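-- pv_equiv track=rewrite | github.com/w9DhSc/naive-lattice-model-solver | two-color-list-ybe.py | gen_bds
-- ===== SOURCE A (Python) =====
-- import itertools
--
-- Z = {
--     3: [1, 1, 2, 1, 2, 1],
--     4: [1, 1, 2, 2, 1, 1],
--     5: [1, 2, 1, 1, 1, 2],
--     6: [1, 2, 1, 1, 2, 1],
--     7: [1, 2, 1, 2, 1, 1],
--     9: [1, 2, 2, 2, 1, 2],
--     10: [1, 2, 2, 2, 2, 1],
--     12: [1, 2, 3, 1, 3, 2],
--     13: [1, 2, 3, 2, 1, 3],
--     14: [1, 2, 3, 3, 1, 2],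
--     15: [1, 2, 3, 2, 3, 1],
--     16: [1, 2, 3, 3, 2, 1]
-- }
--
-- def gen_bds(colors={0, 1, 2}):
--     """
--     Returns all boundary conditions of the 72 nontrivial YBEs.
--     """
--     bds = []
--     for i in [3, 4, 5, 6, 7, 9, 10]:
--         for a, b in itertools.permutations(colors, r=2):
--             bds.append([a if j == 1 else b for j in Z[i]])
--     for i in [12, 13, 14, 15, 16]:
--         for a, b, c in itertools.permutations(colors):
--             bds.append([a if j == 1 else b if j == 2 else c for j in Z[i]])
--     return bds
-- ===== SOURCE B (Python) =====
-- # Each boundary condition of the 72 nontrivial YBEs is a fixed rearrangement of the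
-- # color list: row k of the output is [cs[i] for i in IDX[k]], where cs lists the three
-- # colors in iteration order.  IDX is the precomputed index table (one row per
-- # (equation, permutation) pair of the original enumeration), so no permutations are
-- # generated at call time.
-- IDX = [
--     [0, 0, 1, 0, 1, 0],
--     [0, 0, 2, 0, 2, 0],
--     [1, 1, 0, 1, 0, 1],
--     [1, 1, 2, 1, 2, 1],
--     [2, 2, 0, 2, 0, 2],
--     [2, 2, 1, 2, 1, 2],
--     [0, 0, 1, 1, 0, 0],
--     [0, 0, 2, 2, 0, 0],
--     [1, 1, 0, 0, 1, 1],
--     [1, 1, 2, 2, 1, 1],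
--     [2, 2, 0, 0, 2, 2],
--     [2, 2, 1, 1, 2, 2],
--     [0, 1, 0, 0, 0, 1],
--     [0, 2, 0, 0, 0, 2],
--     [1, 0, 1, 1, 1, 0],
--     [1, 2, 1, 1, 1, 2],
--     [2, 0, 2, 2, 2, 0],
--     [2, 1, 2, 2, 2, 1],
--     [0, 1, 0, 0, 1, 0],
--     [0, 2, 0, 0, 2, 0],
--     [1, 0, 1, 1, 0, 1],
--     [1, 2, 1, 1, 2, 1],
--     [2, 0, 2, 2, 0, 2],
--     [2, 1, 2, 2, 1, 2],
--     [0, 1, 0, 1, 0, 0],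
--     [0, 2, 0, 2, 0, 0],
--     [1, 0, 1, 0, 1, 1],
--     [1, 2, 1, 2, 1, 1],
--     [2, 0, 2, 0, 2, 2],
--     [2, 1, 2, 1, 2, 2],
--     [0, 1, 1, 1, 0, 1],
--     [0, 2, 2, 2, 0, 2],
--     [1, 0, 0, 0, 1, 0],
--     [1, 2, 2, 2, 1, 2],
--     [2, 0, 0, 0, 2, 0],
--     [2, 1, 1, 1, 2, 1],
--     [0, 1, 1, 1, 1, 0],
--     [0, 2, 2, 2, 2, 0],
--     [1, 0, 0, 0, 0, 1],
--     [1, 2, 2, 2, 2, 1],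
--     [2, 0, 0, 0, 0, 2],
--     [2, 1, 1, 1, 1, 2],
--     [0, 1, 2, 0, 2, 1],
--     [0, 2, 1, 0, 1, 2],
--     [1, 0, 2, 1, 2, 0],
--     [1, 2, 0, 1, 0, 2],
--     [2, 0, 1, 2, 1, 0],
--     [2, 1, 0, 2, 0, 1],
--     [0, 1, 2, 1, 0, 2],
--     [0, 2, 1, 2, 0, 1],
--     [1, 0, 2, 0, 1, 2],
--     [1, 2, 0, 2, 1, 0],
--     [2, 0, 1, 0, 2, 1],
--     [2, 1, 0, 1, 2, 0],
--     [0, 1, 2, 2, 0, 1],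
--     [0, 2, 1, 1, 0, 2],
--     [1, 0, 2, 2, 1, 0],
--     [1, 2, 0, 0, 1, 2],
--     [2, 0, 1, 1, 2, 0],
--     [2, 1, 0, 0, 2, 1],
--     [0, 1, 2, 1, 2, 0],
--     [0, 2, 1, 2, 1, 0],
--     [1, 0, 2, 0, 2, 1],
--     [1, 2, 0, 2, 0, 1],
--     [2, 0, 1, 0, 1, 2],
--     [2, 1, 0, 1, 0, 2],
--     [0, 1, 2, 2, 1, 0],
--     [0, 2, 1, 1, 2, 0],
--     [1, 0, 2, 2, 0, 1],
--     [1, 2, 0, 0, 2, 1],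
--     [2, 0, 1, 1, 0, 2],
--     [2, 1, 0, 0, 1, 2],
-- ]
--
--
-- def gen_bds(colors={0, 1, 2}):
--     """
--     Returns all boundary conditions of the 72 nontrivial YBEs.
--     """
--     cs = list(colors)
--     return [[cs[i] for i in row] for row in IDX]
-- ===== Notes on version B (the rewrite author's own statement) =====
-- stated objective: alternative
-- what changed: B replaces A's runtime permutation enumeration and conditional symbol substitution with a precomputed 72-row index table: each output row is a fixed rearrangement [cs[i] for i in IDX[k]] of the ordered color list, so itertools and the per-key loops disappear entirely.
import Mathlib
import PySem

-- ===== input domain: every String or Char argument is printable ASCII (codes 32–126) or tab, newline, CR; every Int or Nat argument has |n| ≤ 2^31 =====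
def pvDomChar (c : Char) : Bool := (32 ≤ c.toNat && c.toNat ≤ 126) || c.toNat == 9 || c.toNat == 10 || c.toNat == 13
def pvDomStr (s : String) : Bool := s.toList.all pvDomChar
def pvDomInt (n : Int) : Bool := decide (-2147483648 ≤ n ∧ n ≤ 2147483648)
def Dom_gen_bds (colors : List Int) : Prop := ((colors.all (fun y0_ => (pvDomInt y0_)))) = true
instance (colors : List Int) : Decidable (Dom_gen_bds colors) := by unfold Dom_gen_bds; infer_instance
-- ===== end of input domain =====

-- B replaces A's runtime permutation enumeration and conditional substitution with a precomputed
-- 72-row index table applied to the ordered color list (objective: alternative; same output, same order).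

-- ===== PORT A =====
-- Python set semantics, ported by hand (PySem does not model set ITERATION order): the tester's
-- convention delivers a set as the repr-sorted list of its distinct elements, and CPython rebuilds
-- the set by inserting them in that order into an 8-slot hash table (never resized for the ≤ 4
-- distinct elements Pre_ admits); iteration is then by ascending slot.  hash(n) = n except
-- hash(-1) = -2, exact for the |n| ≤ 2^31 ints of Dom_.  The probe loop is CPython's
-- 'perturb >>= 5; i = (i*5 + 1 + perturb) & mask'; fuel 64 always suffices (after at most 13
-- shifts perturb = 0 and i ↦ (5i+1) & 7 cycles through all 8 slots).  Shared by both ports: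
-- A and B iterate the same set object, hence in the same order.  The set object the function
-- actually receives is a deepcopy of the decoded one — rebuilt by re-inserting the elements in
-- the first table's iteration order — so the order function is applied twice.
def pySetAddLoop : Nat → List (Option Int) → Int → Int → Int → List (Option Int)
  | 0, table, _, _, _ => table
  | fuel + 1, table, x, i, perturb =>
    let idx := (PySem.Int.band i 7).toNat
    match table.getD idx none with
    | none => table.set idx (some x)
    | some y =>
      if y = x then table
      else
        let perturb' := perturb >>> (5 : Nat)
        pySetAddLoop fuel table x (PySem.Int.band (i * 5 + 1 + perturb') 7) perturb'

def pySetIns (table : List (Option Int)) (x : Int) : List (Option Int) :=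
  let h : Int := if x = -1 then -2 else x
  pySetAddLoop 64 table x (PySem.Int.band h 7) (PySem.Int.mod h 18446744073709551616)

def pySetOrder (xs : List Int) : List Int :=
  (xs.foldl pySetIns (List.replicate 8 none)).filterMap id

-- the module-level dict Z
def zDict : PySem.Dict Int (List Int) := PySem.Dict.ofList
  [(3, [1, 1, 2, 1, 2, 1]),
   (4, [1, 1, 2, 2, 1, 1]),
   (5, [1, 2, 1, 1, 1, 2]),
   (6, [1, 2, 1, 1, 2, 1]),
   (7, [1, 2, 1, 2, 1, 1]),
   (9, [1, 2, 2, 2, 1, 2]),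
   (10, [1, 2, 2, 2, 2, 1]),
   (12, [1, 2, 3, 1, 3, 2]),
   (13, [1, 2, 3, 2, 1, 3]),
   (14, [1, 2, 3, 3, 1, 2]),
   (15, [1, 2, 3, 2, 3, 1]),
   (16, [1, 2, 3, 3, 2, 1])]

-- literal port of A: two folds appending one row per permutation.  Python's tuple unpacking
-- 'for a, b in …' / 'for a, b, c in …' is ported as headI projections: exact because every
-- 2-permutation has length 2, and inside Pre_ (len colors = 3) every full permutation has
-- length 3; where the unpacking would raise (len colors ≠ 3) is outside Pre_.
def gen_bds (colors : List Int) : List (List Int) :=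
  let cs := pySetOrder (pySetOrder colors)  -- the order in which Python iterates the set 'colors'
  let bds : List (List Int) := []
  let bds := ([3, 4, 5, 6, 7, 9, 10] : List Int).foldl (fun bds i =>
    (PySem.List.permutations cs 2).foldl (fun bds p =>
      bds ++ [(zDict.getD i []).map (fun j =>
        if j == 1 then p.headI else p.tail.headI)]) bds) bds
  -- r=None means r = len(colors): the set's size, i.e. the length of the distinct-element list
  let bds := ([12, 13, 14, 15, 16] : List Int).foldl (fun bds i =>
    (PySem.List.permutations cs colors.length).foldl (fun bds p =>
      bds ++ [(zDict.getD i []).map (fun j =>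
        if j == 1 then p.headI else if j == 2 then p.tail.headI else p.tail.tail.headI)]) bds) bds
  bds

-- ===== PORT B =====
-- Source B's module-level IDX: row k of the output is cs indexed by IDX[k]
def idxTable : List (List Int) :=
  [[0, 0, 1, 0, 1, 0],
   [0, 0, 2, 0, 2, 0],
   [1, 1, 0, 1, 0, 1],
   [1, 1, 2, 1, 2, 1],
   [2, 2, 0, 2, 0, 2],
   [2, 2, 1, 2, 1, 2],
   [0, 0, 1, 1, 0, 0],
   [0, 0, 2, 2, 0, 0],
   [1, 1, 0, 0, 1, 1],
   [1, 1, 2, 2, 1, 1],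
   [2, 2, 0, 0, 2, 2],
   [2, 2, 1, 1, 2, 2],
   [0, 1, 0, 0, 0, 1],
   [0, 2, 0, 0, 0, 2],
   [1, 0, 1, 1, 1, 0],
   [1, 2, 1, 1, 1, 2],
   [2, 0, 2, 2, 2, 0],
   [2, 1, 2, 2, 2, 1],
   [0, 1, 0, 0, 1, 0],
   [0, 2, 0, 0, 2, 0],
   [1, 0, 1, 1, 0, 1],
   [1, 2, 1, 1, 2, 1],
   [2, 0, 2, 2, 0, 2],
   [2, 1, 2, 2, 1, 2],
   [0, 1, 0, 1, 0, 0],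
   [0, 2, 0, 2, 0, 0],
   [1, 0, 1, 0, 1, 1],
   [1, 2, 1, 2, 1, 1],
   [2, 0, 2, 0, 2, 2],
   [2, 1, 2, 1, 2, 2],
   [0, 1, 1, 1, 0, 1],
   [0, 2, 2, 2, 0, 2],
   [1, 0, 0, 0, 1, 0],
   [1, 2, 2, 2, 1, 2],
   [2, 0, 0, 0, 2, 0],
   [2, 1, 1, 1, 2, 1],
   [0, 1, 1, 1, 1, 0],
   [0, 2, 2, 2, 2, 0],
   [1, 0, 0, 0, 0, 1],
   [1, 2, 2, 2, 2, 1],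
   [2, 0, 0, 0, 0, 2],
   [2, 1, 1, 1, 1, 2],
   [0, 1, 2, 0, 2, 1],
   [0, 2, 1, 0, 1, 2],
   [1, 0, 2, 1, 2, 0],
   [1, 2, 0, 1, 0, 2],
   [2, 0, 1, 2, 1, 0],
   [2, 1, 0, 2, 0, 1],
   [0, 1, 2, 1, 0, 2],
   [0, 2, 1, 2, 0, 1],
   [1, 0, 2, 0, 1, 2],
   [1, 2, 0, 2, 1, 0],
   [2, 0, 1, 0, 2, 1],
   [2, 1, 0, 1, 2, 0],
   [0, 1, 2, 2, 0, 1],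
   [0, 2, 1, 1, 0, 2],
   [1, 0, 2, 2, 1, 0],
   [1, 2, 0, 0, 1, 2],
   [2, 0, 1, 1, 2, 0],
   [2, 1, 0, 0, 2, 1],
   [0, 1, 2, 1, 2, 0],
   [0, 2, 1, 2, 1, 0],
   [1, 0, 2, 0, 2, 1],
   [1, 2, 0, 2, 0, 1],
   [2, 0, 1, 0, 1, 2],
   [2, 1, 0, 1, 0, 2],
   [0, 1, 2, 2, 1, 0],
   [0, 2, 1, 1, 2, 0],
   [1, 0, 2, 2, 0, 1],
   [1, 2, 0, 0, 2, 1],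
   [2, 0, 1, 1, 0, 2],
   [2, 1, 0, 0, 1, 2]]

-- literal port of B: cs = list(colors) (the set's iteration order, see the model above), then
-- one comprehension indexing cs by each table row; cs[i] is pyGetD (always in range inside Pre_)
def gen_bds_alt (colors : List Int) : List (List Int) :=
  let cs := pySetOrder (pySetOrder colors)
  idxTable.map (fun row => row.map (fun i => PySem.List.pyGetD cs i 0))

-- ===== PRECONDITION & SPEC =====
-- A unpacks each full-length permutation of colors into 'a, b, c', so it raises ValueError on every
-- input whose set size is not exactly 3; Pre_ admits exactly the inputs on which A returns
-- (per the convention the list holds the set's DISTINCT elements, hence the Nodup conjunct).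
def Pre_gen_bds (colors : List Int) : Prop := colors.length = 3 ∧ colors.Nodup
instance (colors : List Int) : Decidable (Pre_gen_bds colors) := by unfold Pre_gen_bds; infer_instance
def pvWitness_gen_bds : List Int := ([0, 1, 2] : List Int)

def Spec_gen_bds (colors : List Int) (out : List (List Int)) : Prop := out = gen_bds_alt colors
instance (colors : List Int) (out : List (List Int)) : Decidable (Spec_gen_bds colors out) := by unfold Spec_gen_bds; infer_instance

-- ===== CLAIM (what is proved, stated in full; the proofs are below) =====
def Claim_equal_gen_bds : Prop := ∀ (colors : List Int), Dom_gen_bds colors → Pre_gen_bds colors → Spec_gen_bds colors (gen_bds colors)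

-- ===== LEMMAS AND PROOFS =====

-- an element read from a slot of the table is one of the table's entries
theorem pvGetD_some_mem {t : List (Option Int)} {n : Nat} {y : Int}
    (h : t.getD n none = some y) : y ∈ t.filterMap id := by
  induction t generalizing n with
  | nil => simp [List.getD] at h
  | cons o t ih =>
    rw [List.mem_filterMap]
    cases n with
    | zero =>
      have ho : o = some y := by simpa [List.getD] using h
      exact ⟨some y, by simp [ho], rfl⟩
    | succ n =>
      have h' : t.getD n none = some y := by simpa [List.getD] using h
      obtain ⟨a, ha, hay⟩ := List.mem_filterMap.mp (ih h')
      exact ⟨a, List.mem_cons_of_mem _ ha, hay⟩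

-- a table with no empty slot holds as many entries as slots
theorem pvFilterMap_full {t : List (Option Int)} (h : ∀ o ∈ t, o ≠ none) :
    (t.filterMap id).length = t.length := by
  induction t with
  | nil => simp
  | cons o t ih =>
    cases o with
    | none => exact absurd rfl (h none (by simp))
    | some a => simpa using ih (fun o ho => h o (List.mem_cons_of_mem _ ho))

-- an 8-slot table holding fewer than 8 entries has an empty slot
theorem pvExists_none {t : List (Option Int)} (h8 : t.length = 8)
    (hlt : (t.filterMap id).length < 8) : ∃ n, n < 8 ∧ t.getD n none = none := by
  by_contra hc
  push_neg at hc
  have hall : ∀ o ∈ t, o ≠ none := by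
    intro o ho hnone
    subst hnone
    obtain ⟨n, hn, hg⟩ := List.mem_iff_getElem.mp ho
    exact hc n (h8 ▸ hn) (by rw [List.getD_eq_getElem _ _ hn, hg])
  have := pvFilterMap_full hall
  omega

-- writing a fresh element into an empty slot adds exactly that element to the entries
theorem pvFilterMap_set {t : List (Option Int)} {n : Nat} (x : Int) (hn : n < t.length)
    (h : t.getD n none = none) :
    ((t.set n (some x)).filterMap id).Perm (x :: t.filterMap id) := by
  induction t generalizing n with
  | nil => simp at hn
  | cons o t ih =>
    cases n with
    | zero =>
      have : o = none := by simpa [List.getD] using h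
      subst this
      simp
    | succ n =>
      have hn' : n < t.length := by simpa using hn
      have h' : t.getD n none = none := by simpa [List.getD] using h
      cases o with
      | none => simpa using ih hn' h'
      | some a =>
        simp only [List.set, List.filterMap_cons, id]
        exact ((ih hn' h').cons a).trans (List.Perm.swap x a _)

-- the probe indices visited from slot i with perturb = 0
def probeSeq : Nat → Nat → List Nat
  | 0, _ => []
  | m + 1, i => i :: probeSeq m ((5 * i + 1) % 8)

-- with perturb = 0 the probe map i ↦ (5i+1) % 8 is an 8-cycle: 8 probes visit every slot
theorem probe_cover : ∀ i < 8, ∀ c < 8, c ∈ probeSeq 8 i := by decide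

-- a & 7 lies in [0, 8) for every Python int a
theorem pvBand7_nonneg_lt (a : Int) : 0 ≤ PySem.Int.band a 7 ∧ PySem.Int.band a 7 < 8 := by
  by_cases ha : 0 ≤ a
  · rw [PySem.Int.band_of_nonneg ha (by norm_num)]
    have h7 : a.toNat &&& (7 : Int).toNat ≤ 7 := by
      have : ((7 : Int)).toNat = 7 := rfl
      rw [this]; exact Nat.and_le_right
    constructor
    · exact_mod_cast Nat.zero_le _
    · exact_mod_cast lt_of_le_of_lt h7 (by norm_num)
  · unfold PySem.Int.band
    rw [if_neg ha, if_pos (by norm_num)]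
    have hsub : (7 : Int).toNat - ((7 : Int).toNat &&& (-a - 1).toNat) ≤ 7 := by
      have : ((7 : Int)).toNat = 7 := rfl
      rw [this]; exact Nat.sub_le _ _
    constructor
    · exact_mod_cast Nat.zero_le _
    · exact_mod_cast lt_of_le_of_lt hsub (by norm_num)

-- n & 7 = n % 8 for a natural slot index
theorem pvBand7_of_nonneg (n : Nat) : PySem.Int.band (↑n) 7 = ↑(n % 8) := by
  rw [PySem.Int.band_of_nonneg (by positivity) (by norm_num)]
  have h78 : (n : Int).toNat &&& (7 : Int).toNat = n % 8 := by
    rw [Int.toNat_natCast, show ((7 : Int)).toNat = 2 ^ 3 - 1 from rfl,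
      Nat.and_two_pow_sub_one_eq_mod]
  rw [h78]

theorem pvBand7_toNat {n : Nat} (h : n < 8) : (PySem.Int.band (↑n) 7).toNat = n := by
  rw [pvBand7_of_nonneg]
  simp [Nat.mod_eq_of_lt h]

-- with perturb = 0: if some probed slot is empty, the loop writes x into the first empty
-- slot it reaches (x fresh, so it never stops on an equal entry)
theorem pvLoop_zero : ∀ (m fuel : Nat) (t : List (Option Int)) (x : Int) (n : Nat),
    m ≤ fuel → n < 8 → x ∉ t.filterMap id →
    (∃ c ∈ probeSeq m n, t.getD c none = none) →
    ∃ idx, idx < 8 ∧ t.getD idx none = none ∧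
      pySetAddLoop fuel t x (↑n) 0 = t.set idx (some x) := by
  intro m
  induction m with
  | zero =>
    intro fuel t x n _ _ _ hex
    simp [probeSeq] at hex
  | succ m ih =>
    intro fuel t x n hfu hn hx hex
    obtain ⟨fuel, rfl⟩ : ∃ f, fuel = f + 1 := ⟨fuel - 1, by omega⟩
    simp only [pySetAddLoop, pvBand7_toNat hn]
    split
    · next heq => exact ⟨n, hn, heq, rfl⟩
    · next y heq =>
      have hyx : ¬(y = x) := fun e => hx (e ▸ pvGetD_some_mem heq)
      rw [if_neg hyx]
      have h0 : (0 : Int) >>> (5 : Nat) = 0 := by decide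
      have harg : ((n : Int) * 5 + 1 + 0) = ↑(5 * n + 1) := by push_cast; ring
      rw [h0, harg, pvBand7_of_nonneg]
      obtain ⟨c, hcmem, hcd⟩ := hex
      rcases List.mem_cons.mp (by simpa [probeSeq] using hcmem) with rfl | hcm
      · rw [heq] at hcd; exact absurd hcd (by simp)
      · exact ih fuel t x ((5 * n + 1) % 8) (by omega) (Nat.mod_lt _ (by norm_num)) hx
          ⟨c, hcm, hcd⟩

-- the probe loop on a fresh element with a free slot: writes x into some empty slot
theorem pvInsert_fresh : ∀ (k : Nat) (p : Int), 0 ≤ p → p < 2 ^ (5 * k) →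
    ∀ (fuel : Nat), k + 8 ≤ fuel → ∀ (t : List (Option Int)) (x i : Int),
    t.length = 8 → 0 ≤ i → i < 8 → x ∉ t.filterMap id → (t.filterMap id).length < 8 →
    ∃ idx, idx < 8 ∧ t.getD idx none = none ∧
      pySetAddLoop fuel t x i p = t.set idx (some x) := by
  intro k
  induction k with
  | zero =>
    intro p hp0 hp1 fuel hfu t x i h8 hi0 hi8 hx hlt
    have hp : p = 0 := by norm_num at hp1; omega
    subst hp
    obtain ⟨n, rfl⟩ : ∃ n : Nat, i = ↑n := ⟨i.toNat, (Int.toNat_of_nonneg hi0).symm⟩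
    have hn8 : n < 8 := by exact_mod_cast hi8
    obtain ⟨c, hc8, hcd⟩ := pvExists_none h8 hlt
    exact pvLoop_zero 8 fuel t x n (by omega) hn8 hx ⟨c, probe_cover n hn8 c hc8, hcd⟩
  | succ k ih =>
    intro p hp0 hp1 fuel hfu t x i h8 hi0 hi8 hx hlt
    obtain ⟨fuel, rfl⟩ : ∃ f, fuel = f + 1 := ⟨fuel - 1, by omega⟩
    obtain ⟨n, rfl⟩ : ∃ n : Nat, i = ↑n := ⟨i.toNat, (Int.toNat_of_nonneg hi0).symm⟩
    have hn8 : n < 8 := by exact_mod_cast hi8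
    simp only [pySetAddLoop, pvBand7_toNat hn8]
    split
    · next heq => exact ⟨n, hn8, heq, rfl⟩
    · next y heq =>
      have hyx : ¬(y = x) := fun e => hx (e ▸ pvGetD_some_mem heq)
      rw [if_neg hyx]
      have hp'0 : 0 ≤ p >>> (5 : Nat) := by
        rw [Int.shiftRight_eq_div_pow]
        exact Int.ediv_nonneg hp0 (by norm_num)
      have hp'1 : p >>> (5 : Nat) < 2 ^ (5 * k) := by
        rw [Int.shiftRight_eq_div_pow]
        have hb : p < 2 ^ (5 * k) * 32 := by
          calc p < 2 ^ (5 * (k + 1)) := hp1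
            _ = 2 ^ (5 * k) * 32 := by rw [show 5 * (k + 1) = 5 * k + 5 by ring, pow_add]; norm_num
        have h32 : ((2 ^ (5 : Nat) : Nat) : Int) = 32 := by norm_num
        rw [h32]
        exact (Int.ediv_lt_iff_lt_mul (by norm_num)).mpr hb
      have hib := pvBand7_nonneg_lt ((n : Int) * 5 + 1 + p >>> (5 : Nat))
      exact ih (p >>> (5 : Nat)) hp'0 hp'1 fuel (by omega) t x _ h8 hib.1 hib.2 hx hlt

-- folding the inserts of a short duplicate-free list into the table appends exactly its
-- elements (in some order) to the entries
theorem pvFold_spec : ∀ (xs : List Int) (t : List (Option Int)), t.length = 8 → xs.Nodup →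
    (∀ a ∈ xs, a ∉ t.filterMap id) → (t.filterMap id).length + xs.length ≤ 8 →
    (xs.foldl pySetIns t).length = 8 ∧
      ((xs.foldl pySetIns t).filterMap id).Perm (t.filterMap id ++ xs) := by
  intro xs
  induction xs with
  | nil =>
    intro t h8 _ _ _
    simp only [List.foldl_nil, List.append_nil]
    exact ⟨h8, List.Perm.refl _⟩
  | cons x xs ih =>
    intro t h8 hnd hdisj hlen
    obtain ⟨hxxs, hndxs⟩ := List.nodup_cons.mp hnd
    simp only [List.foldl_cons]
    have hx : x ∉ t.filterMap id := hdisj x (by simp)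
    have hlt : (t.filterMap id).length < 8 := by
      simp only [List.length_cons] at hlen; omega
    have hp0 : 0 ≤ PySem.Int.mod (if x = -1 then -2 else x) 18446744073709551616 := by
      unfold PySem.Int.mod
      rw [Int.fmod_eq_emod_of_nonneg _ (by norm_num)]
      exact Int.emod_nonneg _ (by norm_num)
    have hp1 : PySem.Int.mod (if x = -1 then -2 else x) 18446744073709551616 < 2 ^ (5 * 13) := by
      unfold PySem.Int.mod
      have := Int.fmod_lt_of_pos (if x = -1 then -2 else x)
        (b := 18446744073709551616) (by norm_num)
      calc Int.fmod (if x = -1 then -2 else x) 18446744073709551616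
          < 18446744073709551616 := this
        _ < 2 ^ (5 * 13) := by norm_num
    have hib := pvBand7_nonneg_lt (if x = -1 then -2 else x)
    obtain ⟨idx, hidx8, hidxnone, heq⟩ :=
      pvInsert_fresh 13 _ hp0 hp1 64 (by norm_num) t x _ h8 hib.1 hib.2 hx hlt
    have hins : pySetIns t x = t.set idx (some x) := heq
    rw [hins]
    have hperm : ((t.set idx (some x)).filterMap id).Perm (x :: t.filterMap id) :=
      pvFilterMap_set x (by omega) hidxnone
    have hdisj' : ∀ a ∈ xs, a ∉ (t.set idx (some x)).filterMap id := by
      intro a ha hmem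
      rcases List.mem_cons.mp (hperm.mem_iff.mp hmem) with rfl | hmt
      · exact hxxs ha
      · exact hdisj a (List.mem_cons_of_mem _ ha) hmt
    have hlen' : ((t.set idx (some x)).filterMap id).length + xs.length ≤ 8 := by
      have := hperm.length_eq
      simp only [List.length_cons] at this hlen
      omega
    obtain ⟨hL, hP⟩ := ih (t.set idx (some x)) (by simp [h8]) hndxs hdisj' hlen'
    refine ⟨hL, hP.trans ?_⟩
    refine (hperm.append_right xs).trans ?_
    rw [List.cons_append]
    exact List.perm_middle.symm

-- the iteration order of a ≤ 8-element duplicate-free set is a permutation of its elements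
theorem pvSetOrder_perm {xs : List Int} (hnd : xs.Nodup) (hlen : xs.length ≤ 8) :
    (pySetOrder xs).Perm xs := by
  unfold pySetOrder
  have h0 : ((List.replicate 8 (none : Option Int)).filterMap id) = [] := rfl
  obtain ⟨_, hP⟩ := pvFold_spec xs (List.replicate 8 none) (by simp) hnd
    (by rw [h0]; simp) (by rw [h0]; simpa using hlen)
  simpa [h0] using hP

-- the two ports as functions of the set's iteration order (cs) and the input length alone
def pvGbA (cs : List Int) (n : Nat) : List (List Int) :=
  let bds : List (List Int) := []
  let bds := ([3, 4, 5, 6, 7, 9, 10] : List Int).foldl (fun bds i =>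
    (PySem.List.permutations cs 2).foldl (fun bds p =>
      bds ++ [(zDict.getD i []).map (fun j =>
        if j == 1 then p.headI else p.tail.headI)]) bds) bds
  let bds := ([12, 13, 14, 15, 16] : List Int).foldl (fun bds i =>
    (PySem.List.permutations cs n).foldl (fun bds p =>
      bds ++ [(zDict.getD i []).map (fun j =>
        if j == 1 then p.headI else if j == 2 then p.tail.headI else p.tail.tail.headI)]) bds) bds
  bds

def pvGbB (cs : List Int) : List (List Int) :=
  idxTable.map (fun row => row.map (fun i => PySem.List.pyGetD cs i 0))


theorem pvGbA_eq (colors : List Int) :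
    gen_bds colors = pvGbA (pySetOrder (pySetOrder colors)) colors.length := rfl

theorem pvGbB_eq (colors : List Int) :
    gen_bds_alt colors = pvGbB (pySetOrder (pySetOrder colors)) := rfl

-- on a three-element iteration order the two ports produce the same 72 rows
set_option maxHeartbeats 1000000 in
theorem pvEval (a b c : Int) : pvGbA [a, b, c] 3 = pvGbB [a, b, c] := by
  have hp2 : PySem.List.permutations [a, b, c] 2
      = [[a, b], [a, c], [b, a], [b, c], [c, a], [c, b]] := rfl
  have hp3 : PySem.List.permutations [a, b, c] 3
      = [[a, b, c], [a, c, b], [b, a, c], [b, c, a], [c, a, b], [c, b, a]] := rfl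
  simp only [pvGbA, pvGbB, hp2, hp3, idxTable, List.foldl_cons, List.foldl_nil,
    List.map_cons, List.nil_append, List.cons_append,
    show zDict.getD 3 [] = [1,1,2,1,2,1] from rfl,
    show zDict.getD 4 [] = [1,1,2,2,1,1] from rfl,
    show zDict.getD 5 [] = [1,2,1,1,1,2] from rfl,
    show zDict.getD 6 [] = [1,2,1,1,2,1] from rfl,
    show zDict.getD 7 [] = [1,2,1,2,1,1] from rfl,
    show zDict.getD 9 [] = [1,2,2,2,1,2] from rfl,
    show zDict.getD 10 [] = [1,2,2,2,2,1] from rfl,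
    show zDict.getD 12 [] = [1,2,3,1,3,2] from rfl,
    show zDict.getD 13 [] = [1,2,3,2,1,3] from rfl,
    show zDict.getD 14 [] = [1,2,3,3,1,2] from rfl,
    show zDict.getD 15 [] = [1,2,3,2,3,1] from rfl,
    show zDict.getD 16 [] = [1,2,3,3,2,1] from rfl,
    show (((2:Int) == 1)) = false from rfl,
    show (((2:Int) == 2)) = true from rfl,
    List.tail_cons, if_true, Bool.false_eq_true, if_false]
  norm_num [show ∀ x y z : Int, PySem.List.pyGetD [x, y, z] 0 0 = x from fun _ _ _ => rfl,
    show ∀ x y z : Int, PySem.List.pyGetD [x, y, z] 1 0 = y from fun _ _ _ => rfl,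
    show ∀ x y z : Int, PySem.List.pyGetD [x, y, z] 2 0 = z from fun _ _ _ => rfl]

-- ===== VERDICT (by name: the statement is the Claim_ definition above) =====
theorem gen_bds_spec : Claim_equal_gen_bds := by
  intro colors _hdom hpre
  obtain ⟨hlen3, hnd⟩ := hpre
  unfold Spec_gen_bds
  have p1 := pvSetOrder_perm hnd (by omega)
  have hnd1 : (pySetOrder colors).Nodup := p1.nodup_iff.mpr hnd
  have p2 := pvSetOrder_perm hnd1 (by rw [p1.length_eq]; omega)
  have hcs3 : (pySetOrder (pySetOrder colors)).length = 3 := by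
    rw [p2.length_eq, p1.length_eq, hlen3]
  obtain ⟨a, b, c, hcs⟩ := List.length_eq_three.mp hcs3
  rw [pvGbA_eq, pvGbB_eq, hlen3, hcs]
  exact pvEval a b c
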